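-- pv_equiv track=rewrite | github.com/dppdppd/BoardRAG | src/handlers/chat.py | _find_nth_user_absolute_index
-- ===== SOURCE A (Python) =====
-- def _find_nth_user_absolute_index(history, n):
--     """Return the absolute index in *history* corresponding to the n-th user message (0-based).
--
--     If not found, returns -1.
--     """
--     user_seen = 0
--     for idx, msg in enumerate(history):
--         if msg.get("role") == "user":
--             if user_seen == n:
--                 return idx
--             user_seen += 1
--     return -1
-- ===== SOURCE B (Python) =====
-- def _find_nth_user_absolute_index(history, n):
--     """Return the absolute index in *history* of the n-th user message (0-based), or -1."""
--     total = sum(1 for m in history if m.get("role") == "user")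
--     if not 0 <= n < total:
--         return -1
--     remaining = total - n
--     seen = 0
--     for offset, m in enumerate(reversed(history)):
--         if m.get("role") == "user":
--             seen += 1
--             if seen == remaining:
--                 return len(history) - 1 - offset
--     return -1
-- ===== Notes on version B (the rewrite author's own statement) =====
-- stated objective: alternative
-- what changed: Instead of A's forward count-and-early-exit scan, B first counts the user messages, rejects out-of-range n, then scans the history BACKWARDS for the (total-n)-th user message from the end and converts the reversed offset back to an absolute index.
import Mathlib
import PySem

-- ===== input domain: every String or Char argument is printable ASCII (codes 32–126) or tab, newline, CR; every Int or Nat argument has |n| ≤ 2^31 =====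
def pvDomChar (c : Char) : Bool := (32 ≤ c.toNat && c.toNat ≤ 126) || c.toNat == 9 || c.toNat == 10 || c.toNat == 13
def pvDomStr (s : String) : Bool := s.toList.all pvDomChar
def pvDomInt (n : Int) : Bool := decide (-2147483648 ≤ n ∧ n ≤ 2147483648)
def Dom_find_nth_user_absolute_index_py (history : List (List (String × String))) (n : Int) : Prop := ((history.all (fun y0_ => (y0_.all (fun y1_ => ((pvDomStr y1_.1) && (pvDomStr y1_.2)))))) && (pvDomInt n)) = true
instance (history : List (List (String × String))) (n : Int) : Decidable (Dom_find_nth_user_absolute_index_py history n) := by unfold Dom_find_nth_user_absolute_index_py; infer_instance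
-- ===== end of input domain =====

-- B replaces A's forward count-and-early-exit scan by counting users first and then scanning the history backwards for the (total-n)-th user from the end (objective: alternative).


-- ===== PORT A =====
-- msg.get("role") on an association list: first matching pair (dict lookup convention)
def pvGetRole (msg : List (String × String)) : Option String :=
  (msg.find? (fun p => p.1 == "role")).map (·.2)

-- the for-loop of A: carries the running absolute index and the user_seen counter
def pvFindLoopA (n : Int) : List (List (String × String)) → Int → Int → Int
  | [], _, _ => -1
  | msg :: rest, idx, user_seen =>
    if pvGetRole msg == some "user" then
      (if user_seen == n then idx else pvFindLoopA n rest (idx + 1) (user_seen + 1))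
    else pvFindLoopA n rest (idx + 1) user_seen

def find_nth_user_absolute_index_py (history : List (List (String × String))) (n : Int) : Int :=
  pvFindLoopA n history 0 0

-- ===== PORT B =====
-- total = sum(1 for m in history if m.get("role") == "user")
def pvCountUsers (history : List (List (String × String))) : Int :=
  history.foldl (fun acc m => if pvGetRole m == some "user" then acc + 1 else acc) 0

-- the backwards for-loop of B: walks reversed(history) carrying offset and seen
def pvLoopB (len remaining : Int) : List (List (String × String)) → Int → Int → Int
  | [], _, _ => -1
  | m :: rest, offset, seen =>
    if pvGetRole m == some "user" then
      (if seen + 1 == remaining then len - 1 - offset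
       else pvLoopB len remaining rest (offset + 1) (seen + 1))
    else pvLoopB len remaining rest (offset + 1) seen

def find_nth_user_absolute_index_py_alt (history : List (List (String × String))) (n : Int) : Int :=
  let total := pvCountUsers history
  if 0 ≤ n ∧ n < total then
    pvLoopB (history.length : Int) (total - n) history.reverse 0 0
  else -1

-- ===== PRECONDITION & SPEC =====
def Spec_find_nth_user_absolute_index_py (history : List (List (String × String))) (n : Int) (out : Int) : Prop := out = find_nth_user_absolute_index_py_alt history n
instance (history : List (List (String × String))) (n : Int) (out : Int) : Decidable (Spec_find_nth_user_absolute_index_py history n out) := by unfold Spec_find_nth_user_absolute_index_py; infer_instance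

-- ===== CLAIM (what is proved, stated in full; the proofs are below) =====
def Claim_equal_find_nth_user_absolute_index_py : Prop := ∀ (history : List (List (String × String))) (n : Int), Dom_find_nth_user_absolute_index_py history n → Spec_find_nth_user_absolute_index_py history n (find_nth_user_absolute_index_py history n)

-- ===== LEMMAS AND PROOFS =====

-- positions (starting at idx) of user messages, as A's scan visits them
def pvUserIdxs : List (List (String × String)) → Int → List Int
  | [], _ => []
  | msg :: rest, idx =>
    if pvGetRole msg == some "user" then idx :: pvUserIdxs rest (idx + 1)
    else pvUserIdxs rest (idx + 1)

-- guarded nth lookup with default -1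
def pvNthOr (l : List Int) (k : Int) : Int :=
  if 0 ≤ k ∧ k < l.length then l.getD k.toNat (-1) else -1

-- backwards lookup: len - 1 - l[k] when in range, else -1
def pvBackOr (len : Int) (l : List Int) (k : Int) : Int :=
  if 0 ≤ k ∧ k < l.length then len - 1 - l.getD k.toNat 0 else -1

theorem pvNthOr_cons (a : Int) (l : List Int) (k : Int) :
    pvNthOr (a :: l) k = if k = 0 then a else pvNthOr l (k - 1) := by
  unfold pvNthOr
  by_cases h0 : k = 0
  · simp [h0]
  · simp only [if_neg h0]
    by_cases hpos : 0 ≤ k ∧ k < (a :: l).length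
    · have hk1 : (0 ≤ k - 1 ∧ k - 1 < (l.length : Int)) := by simp at hpos; omega
      rw [if_pos hpos, if_pos hk1]
      have : k.toNat = (k - 1).toNat + 1 := by omega
      rw [this]; simp
    · rw [if_neg hpos, if_neg (by simp at hpos ⊢; omega)]

theorem pvBackOr_cons (len a : Int) (l : List Int) (k : Int) :
    pvBackOr len (a :: l) k = if k = 0 then len - 1 - a else pvBackOr len l (k - 1) := by
  unfold pvBackOr
  by_cases h0 : k = 0
  · simp [h0]
  · simp only [if_neg h0]
    by_cases hpos : 0 ≤ k ∧ k < (a :: l).length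
    · have hk1 : (0 ≤ k - 1 ∧ k - 1 < (l.length : Int)) := by simp at hpos; omega
      rw [if_pos hpos, if_pos hk1]
      have : k.toNat = (k - 1).toNat + 1 := by omega
      rw [this]; simp
    · rw [if_neg hpos, if_neg (by simp at hpos ⊢; omega)]

theorem pvFindLoopA_eq (n : Int) (hist : List (List (String × String))) (idx seen : Int) :
    pvFindLoopA n hist idx seen = pvNthOr (pvUserIdxs hist idx) (n - seen) := by
  induction hist generalizing idx seen with
  | nil => simp [pvFindLoopA, pvUserIdxs, pvNthOr]
  | cons msg rest ih =>
    unfold pvFindLoopA pvUserIdxs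
    by_cases hu : pvGetRole msg == some "user"
    · rw [if_pos hu, if_pos hu, pvNthOr_cons]
      by_cases he : seen = n
      · simp [he]
      · rw [if_neg (by simpa using he), if_neg (show ¬(n - seen = 0) by omega), ih]
        ring_nf
    · rw [if_neg hu, if_neg hu, ih]

theorem pvLoopB_eq (len r : Int) (hist : List (List (String × String))) (offset seen : Int) :
    pvLoopB len r hist offset seen = pvBackOr len (pvUserIdxs hist offset) (r - seen - 1) := by
  induction hist generalizing offset seen with
  | nil => simp [pvLoopB, pvUserIdxs, pvBackOr]
  | cons msg rest ih =>
    unfold pvLoopB pvUserIdxs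
    by_cases hu : pvGetRole msg == some "user"
    · rw [if_pos hu, if_pos hu, pvBackOr_cons]
      by_cases he : seen + 1 = r
      · rw [if_pos (by simpa using he), if_pos (by omega)]
      · rw [if_neg (by simpa using he), if_neg (show ¬(r - seen - 1 = 0) by omega), ih]
        ring_nf
    · rw [if_neg hu, if_neg hu, ih]

-- shift lemma: starting offset only translates the produced indices
theorem pvUserIdxs_shift (hist : List (List (String × String))) (idx : Int) :
    pvUserIdxs hist idx = (pvUserIdxs hist 0).map (· + idx) := by
  induction hist generalizing idx with
  | nil => simp [pvUserIdxs]
  | cons msg rest ih =>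
    unfold pvUserIdxs
    by_cases hu : pvGetRole msg == some "user"
    · rw [if_pos hu, if_pos hu, ih (idx + 1), ih (0 + 1)]
      simp only [List.map_cons, List.map_map, Function.comp_def]
      exact List.cons_eq_cons.mpr ⟨by ring, List.map_congr_left fun x _ => by ring⟩
    · rw [if_neg hu, if_neg hu, ih (idx + 1), ih (0 + 1)]
      simp only [List.map_map, Function.comp_def]
      exact List.map_congr_left fun x _ => by ring

theorem pvUserIdxs_cons (msg : List (String × String)) (rest : List (List (String × String))) (idx : Int) :
    pvUserIdxs (msg :: rest) idx =
      if pvGetRole msg == some "user" then idx :: pvUserIdxs rest (idx + 1)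
      else pvUserIdxs rest (idx + 1) := rfl

theorem pvUserIdxs_append (xs ys : List (List (String × String))) (idx : Int) :
    pvUserIdxs (xs ++ ys) idx = pvUserIdxs xs idx ++ pvUserIdxs ys (idx + xs.length) := by
  induction xs generalizing idx with
  | nil => simp [pvUserIdxs]
  | cons msg rest ih =>
    rw [List.cons_append, pvUserIdxs_cons, pvUserIdxs_cons msg rest]
    have hlen : idx + 1 + (rest.length : Int) = idx + ((msg :: rest).length : Int) := by
      simp; ring
    by_cases hu : pvGetRole msg == some "user"
    · rw [if_pos hu, if_pos hu, ih (idx + 1), hlen, List.cons_append]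
    · rw [if_neg hu, if_neg hu, ih (idx + 1), hlen]

theorem pvUserIdxs_reverse (hist : List (List (String × String))) :
    pvUserIdxs hist.reverse 0 =
      ((pvUserIdxs hist 0).reverse).map (fun i => (hist.length : Int) - 1 - i) := by
  induction hist with
  | nil => simp [pvUserIdxs]
  | cons msg rest ih =>
    by_cases hu : pvGetRole msg == some "user"
    · rw [List.reverse_cons, pvUserIdxs_append, ih,
        show pvUserIdxs [msg] ((0 : Int) + (rest.reverse.length : Int)) = [(rest.length : Int)]
          from by rw [pvUserIdxs_cons, if_pos hu]; simp [pvUserIdxs],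
        pvUserIdxs_cons msg rest 0, if_pos hu, show (0:Int)+1 = 1 from by norm_num, pvUserIdxs_shift rest 1]
      simp only [List.reverse_cons, List.map_append, List.map_cons, List.map_nil,
        List.map_reverse, List.map_map, Function.comp_def, List.length_cons]
      refine congrArg₂ (· ++ ·) (congrArg List.reverse (List.map_congr_left fun x _ => by
        push_cast; ring)) ?_
      simp
    · rw [List.reverse_cons, pvUserIdxs_append, ih,
        show pvUserIdxs [msg] ((0 : Int) + (rest.reverse.length : Int)) = ([] : List Int)
          from by rw [pvUserIdxs_cons, if_neg hu]; simp [pvUserIdxs],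
        pvUserIdxs_cons msg rest 0, if_neg hu, show (0:Int)+1 = 1 from by norm_num, pvUserIdxs_shift rest 1, List.append_nil]
      simp only [List.map_reverse, List.map_map, Function.comp_def, List.length_cons]
      exact congrArg List.reverse (List.map_congr_left fun x _ => by push_cast; ring)

theorem pvCountUsers_foldl (hist : List (List (String × String))) (a idx : Int) :
    hist.foldl (fun acc m => if pvGetRole m == some "user" then acc + 1 else acc) a
      = a + ((pvUserIdxs hist idx).length : Int) := by
  induction hist generalizing a idx with
  | nil => simp [pvUserIdxs]
  | cons msg rest ih =>
    rw [List.foldl_cons, pvUserIdxs_cons]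
    by_cases hu : pvGetRole msg == some "user"
    · rw [if_pos hu, if_pos hu, ih (a + 1) (idx + 1)]
      simp; ring
    · rw [if_neg hu, if_neg hu, ih a (idx + 1)]

theorem pvCountUsers_eq (hist : List (List (String × String))) :
    pvCountUsers hist = ((pvUserIdxs hist 0).length : Int) := by
  have := pvCountUsers_foldl hist 0 0
  simpa [pvCountUsers] using this

-- ===== VERDICT (by name: the statement is the Claim_ definition above) =====
theorem find_nth_user_absolute_index_py_spec : Claim_equal_find_nth_user_absolute_index_py := by
  intro history n _
  show _ = _
  rw [find_nth_user_absolute_index_py, pvFindLoopA_eq]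
  rw [show n - 0 = n by ring]
  unfold find_nth_user_absolute_index_py_alt
  rw [pvCountUsers_eq]
  set M := pvUserIdxs history 0 with hM
  by_cases h : 0 ≤ n ∧ n < (M.length : Int)
  · rw [if_pos h]
    rw [pvLoopB_eq, pvUserIdxs_reverse]
    have hlenL : (((M.reverse).map (fun i => (history.length : Int) - 1 - i)).length : Int)
        = (M.length : Int) := by simp
    have hk : 0 ≤ (M.length : Int) - n - 0 - 1 ∧
        (M.length : Int) - n - 0 - 1 <
          (((M.reverse).map (fun i => (history.length : Int) - 1 - i)).length : Int) := by
      rw [hlenL]; omega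
    unfold pvBackOr pvNthOr
    rw [if_pos hk, if_pos h]
    have hknat : ((M.length : Int) - n - 0 - 1).toNat = M.length - 1 - n.toNat := by omega
    have hnn : n.toNat < M.length := by omega
    have hrange : M.length - 1 - n.toNat < M.length := by omega
    have hgd : (((M.reverse).map (fun i => (history.length : Int) - 1 - i)).getD
          ((M.length : Int) - n - 0 - 1).toNat 0)
        = (history.length : Int) - 1 - M[n.toNat] := by
      rw [hknat]
      have hlt : M.length - 1 - n.toNat < ((M.reverse).map
          (fun i => (history.length : Int) - 1 - i)).length := by simpa using hrange
      rw [List.getD_eq_getElem _ _ hlt, List.getElem_map, List.getElem_reverse]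
      congr 2
      omega
    rw [hgd, List.getD_eq_getElem _ _ hnn]
    ring
  · rw [if_neg h]
    unfold pvNthOr
    rw [if_neg h]
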